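-- pv_equiv track=rewrite | github.com/himanshu9345/Leet-Code-Practice | Dynamic Programming/Safe to Stop.py | safeToStop
-- ===== SOURCE A (Python) =====
-- def safeToStop(runway, speed, position):
--     if position>=len(runway) or position<0:
--         return False
--
--     if not runway[position]:
--         return False
--
--     if speed == 0:
--         return True
--
--     ans = False
--     for newSpeed in [speed , speed - 1, speed + 1]:
--         ans = ans or safeToStop(runway, newSpeed, position + newSpeed)
--
--     return ans
-- ===== SOURCE B (Python) =====
-- def safeToStop(runway, speed, position):
--     memo = {}
--
--     def go(speed, position):
--         if position >= len(runway) or position < 0 or not runway[position]: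
--             return False
--         if speed == 0:
--             return True
--         key = (speed, position)
--         if key in memo:
--             return memo[key]
--         res = (go(speed, position + speed)
--                or go(speed - 1, position + speed - 1)
--                or go(speed + 1, position + speed + 1))
--         memo[key] = res
--         return res
--
--     return go(speed, position)
-- ===== Notes on version B (the rewrite author's own statement) =====
-- stated objective: faster
-- what changed: replaced the naive exponential three-way recursion by a memoized search keyed on (speed, position), so each reachable state is solved once
import Mathlib
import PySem

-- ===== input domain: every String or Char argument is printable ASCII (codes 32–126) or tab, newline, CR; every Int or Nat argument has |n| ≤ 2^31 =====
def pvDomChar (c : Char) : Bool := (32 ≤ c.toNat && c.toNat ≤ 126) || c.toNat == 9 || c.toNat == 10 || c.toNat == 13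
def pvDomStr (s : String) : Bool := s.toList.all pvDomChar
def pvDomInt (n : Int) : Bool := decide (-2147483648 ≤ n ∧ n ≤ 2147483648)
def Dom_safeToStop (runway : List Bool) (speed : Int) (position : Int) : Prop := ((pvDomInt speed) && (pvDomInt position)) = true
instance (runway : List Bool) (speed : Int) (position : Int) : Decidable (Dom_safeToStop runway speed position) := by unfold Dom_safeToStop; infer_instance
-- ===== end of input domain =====

-- B replaces A's naive exponential three-way recursion by a memoized search keyed on (speed, position), solving each reachable state once.

-- termination measure shared by both recursions (speed 0 is terminal; positive
-- speeds move right, negative speeds move left)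
def pvMu (n : Nat) (s p : Int) : Nat :=
  if s = 0 then 0
  else if 0 ≤ s then 2 * ((n : Int) - p).toNat + 1
  else 2 * (p + 1).toNat + 1

theorem pvMu_dec1 (n : Nat) (s p : Int) (hb : ¬(p ≥ (n : Int) ∨ p < 0)) (hs : ¬s = 0) :
    pvMu n s (p + s) < pvMu n s p := by unfold pvMu; split_ifs <;> omega

theorem pvMu_dec2 (n : Nat) (s p : Int) (hb : ¬(p ≥ (n : Int) ∨ p < 0)) (hs : ¬s = 0) :
    pvMu n (s - 1) (p + (s - 1)) < pvMu n s p := by unfold pvMu; split_ifs <;> omega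

theorem pvMu_dec3 (n : Nat) (s p : Int) (hb : ¬(p ≥ (n : Int) ∨ p < 0)) (hs : ¬s = 0) :
    pvMu n (s + 1) (p + (s + 1)) < pvMu n s p := by unfold pvMu; split_ifs <;> omega

theorem pvNotOr3 {a b : Prop} {c : Bool} (h : ¬(a ∨ b ∨ c = true)) : ¬(a ∨ b) :=
  fun x => h (x.elim Or.inl (fun y => Or.inr (Or.inl y)))

-- ===== PORT A =====
def safeToStop (runway : List Bool) (speed : Int) (position : Int) : Bool :=
  if position ≥ (runway.length : Int) ∨ position < 0 then false
  else if !(PySem.List.pyGetD runway position false) then false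
  else if speed = 0 then true
  else
    let ans := false
    let ans := ans || safeToStop runway speed (position + speed)
    let ans := ans || safeToStop runway (speed - 1) (position + (speed - 1))
    let ans := ans || safeToStop runway (speed + 1) (position + (speed + 1))
    ans
termination_by pvMu runway.length speed position
decreasing_by
  · exact pvMu_dec1 runway.length speed position ‹_› ‹_›
  · exact pvMu_dec2 runway.length speed position ‹_› ‹_›
  · exact pvMu_dec3 runway.length speed position ‹_› ‹_›

-- ===== PORT B =====
-- B's helper go(speed, position) with the memo dict threaded through explicitly
def safeToStopGo (runway : List Bool) (memo : PySem.Dict (Int × Int) Bool)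
    (speed : Int) (position : Int) : Bool × PySem.Dict (Int × Int) Bool :=
  if position ≥ (runway.length : Int) ∨ position < 0 ∨
      !(PySem.List.pyGetD runway position false) then (false, memo)
  else if speed = 0 then (true, memo)
  else
    match memo.get? (speed, position) with
    | some b => (b, memo)
    | none =>
      let r1 := safeToStopGo runway memo speed (position + speed)
      if r1.1 then (true, r1.2.insert (speed, position) true)
      else
        let r2 := safeToStopGo runway r1.2 (speed - 1) (position + (speed - 1))
        if r2.1 then (true, r2.2.insert (speed, position) true)
        else
          let r3 := safeToStopGo runway r2.2 (speed + 1) (position + (speed + 1))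
          (r3.1, r3.2.insert (speed, position) r3.1)
termination_by pvMu runway.length speed position
decreasing_by
  · exact pvMu_dec1 runway.length speed position (pvNotOr3 ‹_›) ‹_›
  · exact pvMu_dec2 runway.length speed position (pvNotOr3 ‹_›) ‹_›
  · exact pvMu_dec3 runway.length speed position (pvNotOr3 ‹_›) ‹_›

def safeToStop_alt (runway : List Bool) (speed : Int) (position : Int) : Bool :=
  (safeToStopGo runway PySem.Dict.empty speed position).1

-- ===== PRECONDITION & SPEC =====
def Spec_safeToStop (runway : List Bool) (speed : Int) (position : Int) (out : Bool) : Prop := out = safeToStop_alt runway speed position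
instance (runway : List Bool) (speed : Int) (position : Int) (out : Bool) : Decidable (Spec_safeToStop runway speed position out) := by unfold Spec_safeToStop; infer_instance

-- ===== CLAIM (what is proved, stated in full; the proofs are below) =====
def Claim_equal_safeToStop : Prop := ∀ (runway : List Bool) (speed : Int) (position : Int), Dom_safeToStop runway speed position → Spec_safeToStop runway speed position (safeToStop runway speed position)

-- ===== LEMMAS AND PROOFS =====

-- every value stored in the memo is the corresponding value of A
def SoundMemo (runway : List Bool) (memo : PySem.Dict (Int × Int) Bool) : Prop :=
  ∀ s p b, memo.get? (s, p) = some b → b = safeToStop runway s p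

theorem soundMemo_insert {runway : List Bool} {memo : PySem.Dict (Int × Int) Bool}
    {s p : Int} {v : Bool} (h : SoundMemo runway memo)
    (hv : v = safeToStop runway s p) :
    SoundMemo runway (memo.insert (s, p) v) := by
  intro s' p' b hb
  rw [PySem.Dict.get?_insert] at hb
  split_ifs at hb with heq
  · cases hb
    simp only [Prod.mk.injEq] at heq
    obtain ⟨h1, h2⟩ := heq
    subst h1; subst h2; exact hv
  · exact h s' p' b hb

-- A's recursive step, with the lets flattened
theorem safeToStop_step (runway : List Bool) (speed position : Int)
    (hb : ¬(position ≥ (runway.length : Int) ∨ position < 0))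
    (hg : PySem.List.pyGetD runway position false = true) (hs : speed ≠ 0) :
    safeToStop runway speed position =
      (safeToStop runway speed (position + speed) ||
        (safeToStop runway (speed - 1) (position + (speed - 1)) ||
          safeToStop runway (speed + 1) (position + (speed + 1)))) := by
  rw [safeToStop]
  simp [hb, hg, hs, Bool.or_assoc]

theorem safeToStopGo_correct (runway : List Bool) :
    ∀ (memo : PySem.Dict (Int × Int) Bool) (speed position : Int),
      SoundMemo runway memo →
      (safeToStopGo runway memo speed position).1 = safeToStop runway speed position ∧
        SoundMemo runway (safeToStopGo runway memo speed position).2 := by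
  intro memo speed position
  induction memo, speed, position using safeToStopGo.induct runway with
  | case1 memo speed position hc =>
    intro h
    rw [safeToStopGo, if_pos hc]
    refine ⟨?_, h⟩
    rw [safeToStop]
    by_cases hb : position ≥ (runway.length : Int) ∨ position < 0
    · simp [hb]
    · rcases hc with hc | hc | hc
      · exact absurd (Or.inl hc) hb
      · exact absurd (Or.inr hc) hb
      · have hg : PySem.List.pyGetD runway position false = false := by simpa using hc
        simp [hb, hg]
  | case2 memo position hc =>
    intro h
    rw [not_or, not_or] at hc
    obtain ⟨hc1, hc2, hc3⟩ := hc
    have hg : PySem.List.pyGetD runway position false = true := by simpa using hc3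
    have hb : ¬(position ≥ (runway.length : Int) ∨ position < 0) := not_or.mpr ⟨hc1, hc2⟩
    rw [safeToStopGo, safeToStop]
    simp [hb, hg]
    exact h
  | case3 memo speed position hc hs b hget =>
    intro h
    rw [safeToStopGo, if_neg hc, if_neg hs]
    simp only [hget]
    exact ⟨h speed position b hget, h⟩
  | case4 memo speed position hc hs hget r1 hr1 ih1 =>
    intro h
    rw [not_or, not_or] at hc
    obtain ⟨hc1, hc2, hc3⟩ := hc
    have hg : PySem.List.pyGetD runway position false = true := by simpa using hc3
    have hb : ¬(position ≥ (runway.length : Int) ∨ position < 0) := not_or.mpr ⟨hc1, hc2⟩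
    obtain ⟨e1, s1⟩ := ih1 h
    have hA : safeToStop runway speed position = true := by
      rw [safeToStop_step runway speed position hb hg hs, ← e1, hr1, Bool.true_or]
    rw [safeToStopGo, if_neg (by rw [not_or, not_or]; exact ⟨hc1, hc2, hc3⟩), if_neg hs]
    simp only [hget]
    rw [if_pos hr1]
    exact ⟨hA.symm, soundMemo_insert s1 hA.symm⟩
  | case5 memo speed position hc hs hget r1 hr1 r2 hr2 ih1 ih2 =>
    intro h
    rw [not_or, not_or] at hc
    obtain ⟨hc1, hc2, hc3⟩ := hc
    have hg : PySem.List.pyGetD runway position false = true := by simpa using hc3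
    have hb : ¬(position ≥ (runway.length : Int) ∨ position < 0) := not_or.mpr ⟨hc1, hc2⟩
    obtain ⟨e1, s1⟩ := ih1 h
    obtain ⟨e2, s2⟩ := ih2 s1
    have hA : safeToStop runway speed position = true := by
      rw [safeToStop_step runway speed position hb hg hs, ← e1, ← e2, hr2]
      simp
    rw [safeToStopGo, if_neg (by rw [not_or, not_or]; exact ⟨hc1, hc2, hc3⟩), if_neg hs]
    simp only [hget]
    rw [if_neg hr1, if_pos hr2]
    exact ⟨hA.symm, soundMemo_insert s2 hA.symm⟩
  | case6 memo speed position hc hs hget r1 hr1 r2 hr2 ih1 ih2 ih2' ih3 =>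
    intro h
    rw [not_or, not_or] at hc
    obtain ⟨hc1, hc2, hc3⟩ := hc
    have hg : PySem.List.pyGetD runway position false = true := by simpa using hc3
    have hb : ¬(position ≥ (runway.length : Int) ∨ position < 0) := not_or.mpr ⟨hc1, hc2⟩
    obtain ⟨e1, s1⟩ := ih1 h
    obtain ⟨e2, s2⟩ := ih2 s1
    obtain ⟨e3, s3⟩ := ih3 s2
    have hA : safeToStop runway speed position =
        (safeToStopGo runway
          (safeToStopGo runway
            (safeToStopGo runway memo speed (position + speed)).2
            (speed - 1) (position + (speed - 1))).2
          (speed + 1) (position + (speed + 1))).1 := by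
      have hf1 : (safeToStopGo runway memo speed (position + speed)).1 = false := by
        simpa using hr1
      have hf2 : (safeToStopGo runway (safeToStopGo runway memo speed (position + speed)).2
          (speed - 1) (position + (speed - 1))).1 = false := by simpa using hr2
      rw [safeToStop_step runway speed position hb hg hs, ← e1, ← e2, ← e3]
      simp only [hf1, Bool.false_or]
      rw [show (safeToStopGo runway r1.2 (speed - 1) (position + (speed - 1))).1
            = false from hf2]
      simp only [Bool.false_or]
      rfl
    rw [safeToStopGo, if_neg (by rw [not_or, not_or]; exact ⟨hc1, hc2, hc3⟩), if_neg hs]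
    simp only [hget]
    rw [if_neg hr1, if_neg hr2]
    exact ⟨hA.symm, soundMemo_insert s3 hA.symm⟩

-- ===== VERDICT (by name: the statement is the Claim_ definition above) =====
theorem safeToStop_spec : Claim_equal_safeToStop := by
  intro runway speed position _
  unfold Spec_safeToStop safeToStop_alt
  have h0 : SoundMemo runway PySem.Dict.empty := by
    intro s p b hb; simp [PySem.Dict.get?_empty] at hb
  exact (safeToStopGo_correct runway PySem.Dict.empty speed position h0).1.symm
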